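-- pv_equiv track=rewrite | github.com/TDSxJONEY/flask-nlp-mermaid-app | app/nlp_processing.py | generate_mermaid_code
-- ===== SOURCE A (Python) =====
-- def generate_mermaid_code(concepts):
--     mermaid_lines = ["graph TD"]
--     for i, concept in enumerate(concepts):
--         if i < len(concepts) - 1:
--             mermaid_lines.append(f"    A{i}[{concept}] --> A{i+1}[{concepts[i+1]}]")
--         else:
--             mermaid_lines.append(f"    A{i}[{concept}]")
--     return "\n".join(mermaid_lines)
-- ===== SOURCE B (Python) =====
-- def generate_mermaid_code(concepts):
--     # Build the diagram back-to-front: walk the indices in reverse carrying the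
--     # successor concept, so no look-ahead indexing and no last-element test is
--     # needed (the very first iteration, with no successor yet, is the tail node).
--     rev = []
--     succ = None
--     for i in range(len(concepts) - 1, -1, -1):
--         c = concepts[i]
--         if succ is None:
--             rev.append(f"    A{i}[{c}]")
--         else:
--             rev.append(f"    A{i}[{c}] --> A{i + 1}[{succ}]")
--         succ = c
--     return "\n".join(["graph TD"] + rev[::-1])
-- ===== Notes on version B (the rewrite author's own statement) =====
-- stated objective: alternative
-- what changed: Replaces A's forward indexed loop with its in-loop last-element length test and concepts[i+1] look-ahead by a back-to-front traversal that carries the successor concept in an accumulator (the first reverse iteration, with no successor yet, is the standalone tail node), then reverses the collected lines before joining.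
import Mathlib
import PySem

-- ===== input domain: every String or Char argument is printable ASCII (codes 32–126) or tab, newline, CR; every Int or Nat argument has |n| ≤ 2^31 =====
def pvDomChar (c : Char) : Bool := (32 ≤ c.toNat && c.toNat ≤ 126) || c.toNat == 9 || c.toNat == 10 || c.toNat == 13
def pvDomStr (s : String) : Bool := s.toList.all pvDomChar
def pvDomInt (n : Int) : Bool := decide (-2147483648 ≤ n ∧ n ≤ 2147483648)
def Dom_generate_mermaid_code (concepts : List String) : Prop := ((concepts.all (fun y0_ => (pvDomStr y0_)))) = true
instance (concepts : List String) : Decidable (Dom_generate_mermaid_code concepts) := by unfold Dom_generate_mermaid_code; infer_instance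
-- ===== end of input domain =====

-- B builds the diagram back-to-front carrying the successor concept (no look-ahead
-- indexing, no last-element length test), then reverses; objective: alternative.


-- ===== PORT A =====
def generate_mermaid_code (concepts : List String) : String :=
  let mermaid_lines : List String := ["graph TD"]
  let mermaid_lines := (PySem.List.enumerate concepts 0).foldl
    (fun mermaid_lines p =>
      if p.1 < (concepts.length : Int) - 1 then
        mermaid_lines ++ ["    A" ++ PySem.Int.toStr p.1 ++ "[" ++ p.2 ++ "] --> A" ++
          PySem.Int.toStr (p.1 + 1) ++ "[" ++ PySem.List.pyGetD concepts (p.1 + 1) "" ++ "]"]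
      else
        mermaid_lines ++ ["    A" ++ PySem.Int.toStr p.1 ++ "[" ++ p.2 ++ "]"])
    mermaid_lines
  PySem.Str.join "\n" mermaid_lines

-- ===== PORT B =====
-- Source B's loop body: state (rev, succ); 'concepts[i]' is exact as pyGetD since the
-- countdown range only yields in-range indices.
def pvStepB (concepts : List String) (st : List String × Option String) (i : Int) :
    List String × Option String :=
  let c := PySem.List.pyGetD concepts i ""
  match st.2 with
  | none =>
      (st.1 ++ ["    A" ++ PySem.Int.toStr i ++ "[" ++ c ++ "]"], some c)
  | some succ =>
      (st.1 ++ ["    A" ++ PySem.Int.toStr i ++ "[" ++ c ++ "] --> A" ++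
        PySem.Int.toStr (i + 1) ++ "[" ++ succ ++ "]"], some c)

def generate_mermaid_code_alt (concepts : List String) : String :=
  let st := (PySem.List.pyRange ((concepts.length : Int) - 1) (-1) (-1)).foldl
    (pvStepB concepts) ([], none)
  PySem.Str.join "\n" (["graph TD"] ++ st.1.reverse)

-- ===== PRECONDITION & SPEC =====
def Spec_generate_mermaid_code (concepts : List String) (out : String) : Prop := out = generate_mermaid_code_alt concepts
instance (concepts : List String) (out : String) : Decidable (Spec_generate_mermaid_code concepts out) := by unfold Spec_generate_mermaid_code; infer_instance

-- ===== CLAIM (what is proved, stated in full; the proofs are below) =====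
def Claim_equal_generate_mermaid_code : Prop := ∀ (concepts : List String), Dom_generate_mermaid_code concepts → Spec_generate_mermaid_code concepts (generate_mermaid_code concepts)

-- ===== LEMMAS AND PROOFS =====

-- the per-index line A emits
def lineA (concepts : List String) (p : Int × String) : String :=
  if p.1 < (concepts.length : Int) - 1 then
    "    A" ++ PySem.Int.toStr p.1 ++ "[" ++ p.2 ++ "] --> A" ++
      PySem.Int.toStr (p.1 + 1) ++ "[" ++ PySem.List.pyGetD concepts (p.1 + 1) "" ++ "]"
  else
    "    A" ++ PySem.Int.toStr p.1 ++ "[" ++ p.2 ++ "]"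

theorem a_lines (concepts : List String) :
    generate_mermaid_code concepts =
      PySem.Str.join "\n" ("graph TD" :: (PySem.List.enumerate concepts 0).map (lineA concepts)) := by
  simp only [generate_mermaid_code]
  rw [PySem.List.foldl_congr_mem _ _
    (fun acc (p : Int × String) => acc ++ [lineA concepts p]) _
    (by intro acc p _
        by_cases hc : p.1 < (concepts.length : Int) - 1 <;> simp [lineA, hc])]
  rw [PySem.List.foldl_append_singleton_eq_map]
  simp

theorem pyGetD_nat (concepts : List String) (m : Nat) (hm : m < concepts.length) :
    PySem.List.pyGetD concepts (m : Int) "" = concepts[m] := by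
  rw [PySem.List.pyGetD_natCast, List.getD_eq_getElem _ _ hm]

theorem loopB (concepts : List String) :
    ∀ (m : Nat), m ≤ concepts.length →
    ∀ (acc : List String) (s : Option String),
      ((m = concepts.length ∧ s = none) ∨
        (∃ hlt : m < concepts.length, s = some (concepts[m]))) →
      ((PySem.List.pyRange ((m : Int) - 1) (-1) (-1)).foldl (pvStepB concepts) (acc, s)).1
        = acc ++ ((PySem.List.enumerate (concepts.take m) 0).map (lineA concepts)).reverse := by
  intro m
  induction m with
  | zero =>
    intro _ acc s _
    rw [PySem.List.pyRange_neg_one_eq_nil (by norm_num)]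
    simp [PySem.List.enumerate_nil]
  | succ m ih =>
    intro hm acc s hs
    have hmlt : m < concepts.length := by omega
    rw [show ((m + 1 : Nat) : Int) - 1 = (m : Int) by push_cast; ring]
    rw [PySem.List.pyRange_neg_one_cons (by omega)]
    rw [List.foldl_cons]
    have hc : PySem.List.pyGetD concepts (m : Int) "" = concepts[m] := pyGetD_nat concepts m hmlt
    have hstep : pvStepB concepts (acc, s) (m : Int)
        = (acc ++ [lineA concepts ((m : Int), concepts[m])], some concepts[m]) := by
      rcases hs with ⟨hmn, hsn⟩ | ⟨hlt, hss⟩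
      · have hcond : ¬ ((m : Int) < (concepts.length : Int) - 1) := by omega
        simp [pvStepB, hsn, hc, lineA, hcond]
      · have hcond : (m : Int) < (concepts.length : Int) - 1 := by omega
        have hnext : PySem.List.pyGetD concepts ((m : Int) + 1) "" = concepts[m + 1] := by
          rw [show (m : Int) + 1 = ((m + 1 : Nat) : Int) by push_cast; ring]
          exact pyGetD_nat concepts (m + 1) hlt
        simp [pvStepB, hss, hc, lineA, hcond, hnext]
    rw [hstep]
    rw [ih (by omega) _ _ (Or.inr ⟨hmlt, rfl⟩)]
    have htake : concepts.take (m + 1) = concepts.take m ++ [concepts[m]] := by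
      rw [List.take_add_one, List.getElem?_eq_getElem hmlt]
      rfl
    have hlen : (concepts.take m).length = m := by
      simp [List.length_take]
      omega
    rw [htake, PySem.List.enumerate_append, hlen]
    rw [PySem.List.enumerate_cons, PySem.List.enumerate_nil]
    simp [List.append_assoc]

theorem ports_eq (concepts : List String) :
    generate_mermaid_code concepts = generate_mermaid_code_alt concepts := by
  rw [a_lines]
  simp only [generate_mermaid_code_alt]
  rcases Nat.eq_zero_or_pos concepts.length with h0 | hpos
  · have hnil : concepts = [] := List.length_eq_zero_iff.mp h0
    subst hnil
    rw [PySem.List.pyRange_neg_one_eq_nil (by norm_num)]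
    simp [PySem.List.enumerate_nil]
  · rw [loopB concepts concepts.length le_rfl [] none (Or.inl ⟨rfl, rfl⟩)]
    simp

-- ===== VERDICT (by name: the statement is the Claim_ definition above) =====
theorem generate_mermaid_code_spec : Claim_equal_generate_mermaid_code := by
  intro concepts _
  unfold Spec_generate_mermaid_code
  exact ports_eq concepts
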